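-- pv_equiv track=rewrite | github.com/OFCIHLAVA/Python-2022 | github backup/OFCIHLAVA-pocitadlo-materialu/NA reborn.py | delete_lvl_from_heading
-- ===== SOURCE A (Python) =====
-- def delete_lvl_from_heading(heading=str):
--     # charaktery k odstraneni z nazvu sloupcu, aby se odstranila informace o levelu. (Pokud by se upravil nazev v zahlavi, je nutno tady take upravit.)
--     to_delete = [
--         "vrchol",
--         "lvl",
--         "1",
--         "2",
--         "3",
--         "4",
--         "5",
--         "6",
--         "7",
--         "8",
--         "9",
--         "10",
--         "11"
--         ]
--     for char in to_delete:
--         heading = heading.replace(char,"")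
--     heading = heading.strip()
--     return heading
-- ===== SOURCE B (Python) =====
-- def delete_lvl_from_heading(heading=str):
--     # remove the level words first, then drop digit characters 1-9 in one scan
--     heading = heading.replace("vrchol", "").replace("lvl", "")
--     heading = "".join(c for c in heading if c not in "123456789")
--     return heading.strip()
-- ===== Notes on version B (the rewrite author's own statement) =====
-- stated objective: simpler
-- what changed: Replaces the loop of repeated .replace passes over a 13-entry substring list by the two word replaces plus one single character-filter pass dropping digits 1-9 (the '10'/'11' entries are dead code since all '1's are already gone).
import Mathlib
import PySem

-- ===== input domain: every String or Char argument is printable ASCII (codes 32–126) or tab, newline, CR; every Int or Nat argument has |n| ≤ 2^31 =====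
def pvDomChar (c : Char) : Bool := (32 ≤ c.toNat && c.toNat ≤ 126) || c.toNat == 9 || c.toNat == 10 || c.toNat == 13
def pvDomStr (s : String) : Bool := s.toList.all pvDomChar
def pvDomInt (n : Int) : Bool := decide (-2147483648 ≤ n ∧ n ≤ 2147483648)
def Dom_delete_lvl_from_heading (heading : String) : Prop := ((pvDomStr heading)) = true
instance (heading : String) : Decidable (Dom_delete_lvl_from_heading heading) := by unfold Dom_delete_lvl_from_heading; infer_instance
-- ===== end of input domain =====

-- B replaces A's loop of 13 repeated .replace passes by the two word replaces plus one
-- character-filter pass dropping digits 1-9 (simpler; '10'/'11' entries are dead code).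

-- ===== PORT A =====
def delete_lvl_from_heading (heading : String) : String :=
  let to_delete : List String :=
    ["vrchol", "lvl", "1", "2", "3", "4", "5", "6", "7", "8", "9", "10", "11"]
  let heading := to_delete.foldl (fun h ch => PySem.Str.replace h ch "") heading
  PySem.Str.strip heading

-- ===== PORT B =====
def delete_lvl_from_heading_alt (heading : String) : String :=
  let heading := PySem.Str.replace (PySem.Str.replace heading "vrchol" "") "lvl" ""
  let heading := String.mk (heading.toList.filter (fun c => !("123456789".toList.contains c)))
  PySem.Str.strip heading

-- ===== PRECONDITION & SPEC =====
def Spec_delete_lvl_from_heading (heading : String) (out : String) : Prop := out = delete_lvl_from_heading_alt heading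
instance (heading : String) (out : String) : Decidable (Spec_delete_lvl_from_heading heading out) := by unfold Spec_delete_lvl_from_heading; infer_instance

-- ===== CLAIM (what is proved, stated in full; the proofs are below) =====
def Claim_equal_delete_lvl_from_heading : Prop := ∀ (heading : String), Dom_delete_lvl_from_heading heading → Spec_delete_lvl_from_heading heading (delete_lvl_from_heading heading)

-- ===== LEMMAS AND PROOFS =====

-- replace by a single char with "" is exactly a filter
theorem pv_go_single (c : Char) : ∀ (fuel : Nat) (l acc : List Char), l.length ≤ fuel →
    PySem.Chars.replace.go [c] [] fuel l acc = acc.reverse ++ l.filter (fun x => x != c) := by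
  intro fuel
  induction fuel with
  | zero =>
    intro l acc h
    have : l = [] := List.eq_nil_of_length_eq_zero (Nat.le_zero.mp h)
    subst this; simp [PySem.Chars.replace.go]
  | succ n ih =>
    intro l acc h
    cases l with
    | nil => simp [PySem.Chars.replace.go]
    | cons d t =>
      simp only [PySem.Chars.replace.go]
      by_cases hcd : c = d
      · subst hcd
        have hp : List.isPrefixOf [c] (c :: t) = true := by simp [List.isPrefixOf]
        rw [if_pos hp]
        simp only [List.length_cons] at h
        simp only [List.length_cons, List.length_nil, List.drop, List.reverse_nil, List.nil_append]
        rw [ih t acc (by omega)]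
        simp
      · have hp : List.isPrefixOf [c] (d :: t) = false := by
          simp [List.isPrefixOf]; exact hcd
        rw [if_neg (by simp [hp])]
        simp only [List.length_cons] at h
        rw [ih t (d :: acc) (by omega)]
        simp [Ne.symm hcd]

theorem pv_replace_single (c : Char) (l : List Char) :
    PySem.Chars.replace l [c] [] = l.filter (fun x => x != c) := by
  rw [PySem.Chars.replace]
  simp only [List.isEmpty_cons, if_false, Bool.false_eq_true]
  simpa using pv_go_single c l.length l [] le_rfl

-- replace is a no-op when the first char of the pattern does not occur
theorem pv_go_noop (c : Char) (rest new : List Char) : ∀ (fuel : Nat) (l acc : List Char),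
    l.length ≤ fuel → c ∉ l →
    PySem.Chars.replace.go (c :: rest) new fuel l acc = acc.reverse ++ l := by
  intro fuel
  induction fuel with
  | zero =>
    intro l acc h _
    have : l = [] := List.eq_nil_of_length_eq_zero (Nat.le_zero.mp h)
    subst this; simp [PySem.Chars.replace.go]
  | succ n ih =>
    intro l acc h hmem
    cases l with
    | nil => simp [PySem.Chars.replace.go]
    | cons d t =>
      have hdc : ¬ (c = d) := fun h' => hmem (h' ▸ List.mem_cons_self ..)
      simp only [PySem.Chars.replace.go]
      have hp : List.isPrefixOf (c :: rest) (d :: t) = false := by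
        simp [List.isPrefixOf]; exact fun h' => absurd h' hdc
      rw [if_neg (by simp [hp])]
      simp only [List.length_cons] at h
      rw [ih t (d :: acc) (by omega) (fun h' => hmem (List.mem_cons_of_mem _ h'))]
      simp

theorem pv_replace_noop (c : Char) (rest new l : List Char) (h : c ∉ l) :
    PySem.Chars.replace l (c :: rest) new = l := by
  rw [PySem.Chars.replace]
  simp only [List.isEmpty_cons, if_false, Bool.false_eq_true]
  simpa using pv_go_noop c rest new l.length l [] le_rfl h

-- the nine single-char filters combined equal B's one-pass digit filter
theorem pv_pred (a : Char) :
    (!(("123456789".toList).contains a)) =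
    ((a != '9') && ((a != '8') && ((a != '7') && ((a != '6') && ((a != '5') && ((a != '4') && ((a != '3') && ((a != '2') && (a != '1'))))))))) := by
  have hl : "123456789".toList = ['1','2','3','4','5','6','7','8','9'] := by decide
  rw [hl]
  by_cases h : a ∈ (['1','2','3','4','5','6','7','8','9'] : List Char)
  · have hc : (['1','2','3','4','5','6','7','8','9'] : List Char).contains a = true := by simpa using h
    rw [hc]
    fin_cases h <;> decide
  · have hc : (['1','2','3','4','5','6','7','8','9'] : List Char).contains a = false := by simpa using h
    rw [hc]
    simp only [List.mem_cons, List.not_mem_nil, or_false, not_or] at h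
    obtain ⟨h1,h2,h3,h4,h5,h6,h7,h8,h9⟩ := h
    simp [bne_iff_ne, h1,h2,h3,h4,h5,h6,h7,h8,h9]

-- ===== VERDICT (by name: the statement is the Claim_ definition above) =====
theorem delete_lvl_from_heading_spec : Claim_equal_delete_lvl_from_heading := by
  intro heading _
  unfold Spec_delete_lvl_from_heading delete_lvl_from_heading delete_lvl_from_heading_alt
  simp only [List.foldl]
  refine congrArg PySem.Str.strip ?_
  apply String.toList_inj.mp
  generalize PySem.Str.replace (PySem.Str.replace heading "vrchol" "") "lvl" "" = r2
  have step : ∀ (s : String) (o : String) (c : Char), o.toList = [c] →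
      (PySem.Str.replace s o "").toList = s.toList.filter (fun x => x != c) := by
    intro s o c ho
    rw [PySem.Str.toList_replace, ho]
    exact pv_replace_single c s.toList
  have noop : ∀ (s : String) (o : String) (rest : List Char), o.toList = '1' :: rest →
      '1' ∉ s.toList → (PySem.Str.replace s o "").toList = s.toList := by
    intro s o rest ho h1
    rw [PySem.Str.toList_replace, ho]
    exact pv_replace_noop '1' rest [] s.toList h1
  have t1 : ((PySem.Str.replace r2 "1" "")).toList = (List.filter (fun x => x != '1') r2.toList) := step _ "1" '1' rfl
  have t2 : ((PySem.Str.replace (PySem.Str.replace r2 "1" "") "2" "")).toList = (List.filter (fun x => x != '2') (List.filter (fun x => x != '1') r2.toList)) := by rw [step _ "2" '2' rfl, t1]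
  have t3 : ((PySem.Str.replace (PySem.Str.replace (PySem.Str.replace r2 "1" "") "2" "") "3" "")).toList = (List.filter (fun x => x != '3') (List.filter (fun x => x != '2') (List.filter (fun x => x != '1') r2.toList))) := by rw [step _ "3" '3' rfl, t2]
  have t4 : ((PySem.Str.replace (PySem.Str.replace (PySem.Str.replace (PySem.Str.replace r2 "1" "") "2" "") "3" "") "4" "")).toList = (List.filter (fun x => x != '4') (List.filter (fun x => x != '3') (List.filter (fun x => x != '2') (List.filter (fun x => x != '1') r2.toList)))) := by rw [step _ "4" '4' rfl, t3]
  have t5 : ((PySem.Str.replace (PySem.Str.replace (PySem.Str.replace (PySem.Str.replace (PySem.Str.replace r2 "1" "") "2" "") "3" "") "4" "") "5" "")).toList = (List.filter (fun x => x != '5') (List.filter (fun x => x != '4') (List.filter (fun x => x != '3') (List.filter (fun x => x != '2') (List.filter (fun x => x != '1') r2.toList))))) := by rw [step _ "5" '5' rfl, t4]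
  have t6 : ((PySem.Str.replace (PySem.Str.replace (PySem.Str.replace (PySem.Str.replace (PySem.Str.replace (PySem.Str.replace r2 "1" "") "2" "") "3" "") "4" "") "5" "") "6" "")).toList = (List.filter (fun x => x != '6') (List.filter (fun x => x != '5') (List.filter (fun x => x != '4') (List.filter (fun x => x != '3') (List.filter (fun x => x != '2') (List.filter (fun x => x != '1') r2.toList)))))) := by rw [step _ "6" '6' rfl, t5]
  have t7 : ((PySem.Str.replace (PySem.Str.replace (PySem.Str.replace (PySem.Str.replace (PySem.Str.replace (PySem.Str.replace (PySem.Str.replace r2 "1" "") "2" "") "3" "") "4" "") "5" "") "6" "") "7" "")).toList = (List.filter (fun x => x != '7') (List.filter (fun x => x != '6') (List.filter (fun x => x != '5') (List.filter (fun x => x != '4') (List.filter (fun x => x != '3') (List.filter (fun x => x != '2') (List.filter (fun x => x != '1') r2.toList))))))) := by rw [step _ "7" '7' rfl, t6]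
  have t8 : ((PySem.Str.replace (PySem.Str.replace (PySem.Str.replace (PySem.Str.replace (PySem.Str.replace (PySem.Str.replace (PySem.Str.replace (PySem.Str.replace r2 "1" "") "2" "") "3" "") "4" "") "5" "") "6" "") "7" "") "8" "")).toList = (List.filter (fun x => x != '8') (List.filter (fun x => x != '7') (List.filter (fun x => x != '6') (List.filter (fun x => x != '5') (List.filter (fun x => x != '4') (List.filter (fun x => x != '3') (List.filter (fun x => x != '2') (List.filter (fun x => x != '1') r2.toList)))))))) := by rw [step _ "8" '8' rfl, t7]
  have t9 : ((PySem.Str.replace (PySem.Str.replace (PySem.Str.replace (PySem.Str.replace (PySem.Str.replace (PySem.Str.replace (PySem.Str.replace (PySem.Str.replace (PySem.Str.replace r2 "1" "") "2" "") "3" "") "4" "") "5" "") "6" "") "7" "") "8" "") "9" "")).toList = (List.filter (fun x => x != '9') (List.filter (fun x => x != '8') (List.filter (fun x => x != '7') (List.filter (fun x => x != '6') (List.filter (fun x => x != '5') (List.filter (fun x => x != '4') (List.filter (fun x => x != '3') (List.filter (fun x => x != '2') (List.filter (fun x => x != '1') r2.toList))))))))) := by rw [step _ "9" '9' rfl, 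t8]
  have hmem : '1' ∉ ((PySem.Str.replace (PySem.Str.replace (PySem.Str.replace (PySem.Str.replace (PySem.Str.replace (PySem.Str.replace (PySem.Str.replace (PySem.Str.replace (PySem.Str.replace r2 "1" "") "2" "") "3" "") "4" "") "5" "") "6" "") "7" "") "8" "") "9" "")).toList := by
    rw [t9]; intro h; simp [List.mem_filter] at h
  have t10' : (PySem.Str.replace (PySem.Str.replace (PySem.Str.replace (PySem.Str.replace (PySem.Str.replace (PySem.Str.replace (PySem.Str.replace (PySem.Str.replace (PySem.Str.replace (PySem.Str.replace r2 "1" "") "2" "") "3" "") "4" "") "5" "") "6" "") "7" "") "8" "") "9" "") "10" "").toList = ((PySem.Str.replace (PySem.Str.replace (PySem.Str.replace (PySem.Str.replace (PySem.Str.replace (PySem.Str.replace (PySem.Str.replace (PySem.Str.replace (PySem.Str.replace r2 "1" "") "2" "") "3" "") "4" "") "5" "") "6" "") "7" "") "8" "") "9" "")).toList :=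
    noop _ "10" ['0'] rfl hmem
  have hmem' : '1' ∉ (PySem.Str.replace (PySem.Str.replace (PySem.Str.replace (PySem.Str.replace (PySem.Str.replace (PySem.Str.replace (PySem.Str.replace (PySem.Str.replace (PySem.Str.replace (PySem.Str.replace r2 "1" "") "2" "") "3" "") "4" "") "5" "") "6" "") "7" "") "8" "") "9" "") "10" "").toList := by
    rw [t10']; exact hmem
  rw [noop _ "11" ['1'] rfl hmem', t10', t9]
  have hmk : ∀ (l : List Char), (String.mk l).toList = l := fun l => Eq.symm (String.ofList_eq.mp rfl)
  rw [hmk]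
  simp only [List.filter_filter]
  apply List.filter_congr
  intro a _
  simpa using (pv_pred a).symm
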